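-- pv_equiv track=rewrite | github.com/Rhodesagi/rhodes-static | user-sites/user_1032/spectral_coloring.py | allocate_registers
-- ===== SOURCE A (Python) =====
-- from collections import defaultdict
--
-- def build_interference_graph(instructions, live_ranges):
--     """Build interference graph from live ranges."""
--     graph = defaultdict(set)
--     for var, (start, end) in live_ranges.items():
--         for other, (ostart, oend) in live_ranges.items():
--             if var != other and not (end < ostart or start > oend):
--                 graph[var].add(other)
--     return graph
--
-- def spectral_partition(graph, nodes, k=2):
--     """
--     Simple spectral-style partitioning using Fiedler vector approximation.
--     For prototype: use degree-based heuristic as Fiedler approximator.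
--     """
--     if len(nodes) <= k:
--         return [[n] for n in nodes]
--
--     # Compute "Laplacian" degrees
--     degrees = {n: len(graph[n] & set(nodes)) for n in nodes}
--     sorted_nodes = sorted(nodes, key=lambda n: degrees[n])
--
--     # Partition by sorted order (simplified spectral cut)
--     chunk = len(nodes) // k
--     return [sorted_nodes[i:i+chunk] for i in range(0, len(nodes), chunk)]
--
-- def color_partition(graph, partition, colors_available, assigned):
--     """Color a partition with minimal spill."""
--     for node in partition:
--         used = {assigned.get(neigh) for neigh in graph[node]
--                 if neigh in assigned}
--         for color in colors_available:
--             if color not in used: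
--                 assigned[node] = color
--                 break
--         # Spill if no color available (not handling spill code here)
--     return assigned
--
-- def allocate_registers(instructions, live_ranges, num_regs=16):
--     """
--     Main entry: spectral coloring allocator.
--
--     Returns: dict mapping virtual registers to physical registers
--     """
--     graph = build_interference_graph(instructions, live_ranges)
--     nodes = list(live_ranges.keys())
--
--     # Phase 1: Spectral partitioning
--     partitions = spectral_partition(graph, nodes, k=num_regs//4)
--
--     # Phase 2: Color each partition
--     assigned = {}
--     colors = list(range(num_regs))
--
--     for part in partitions:
--         # Reserve colors used by neighbors of this partition
--         boundary = set()
--         for node in part: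
--             boundary.update(graph[node] - set(part))
--         reserved = {assigned.get(b) for b in boundary if b in assigned}
--         available = [c for c in colors if c not in reserved]
--
--         assigned = color_partition(graph, part, available, assigned)
--
--     return assigned
-- ===== SOURCE B (Python) =====
-- from collections import defaultdict
--
--
-- def build_interference_graph(instructions, live_ranges):
--     """Sweep line: sort intervals by start; each interval is only tested
--     against the pruned 'active' list of still-open earlier intervals."""
--     graph = defaultdict(set)
--     active = []
--     for var, (start, end) in sorted(live_ranges.items(), key=lambda kv: kv[1][0]):
--         active = [u for u in active if u[1][1] >= start]
--         for other, (ostart, oend) in active: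
--             if ostart <= end:
--                 graph[other].add(var)
--                 graph[var].add(other)
--         active.append((var, (start, end)))
--     return graph
--
--
-- def spectral_partition(graph, nodes, k=2):
--     if len(nodes) <= k:
--         return [[n] for n in nodes]
--     node_set = set(nodes)
--     degrees = {}
--     for n in nodes:
--         degrees[n] = len([x for x in graph[n] if x in node_set])
--     sorted_nodes = sorted(nodes, key=lambda n: degrees[n])
--     chunk = len(nodes) // k
--     return [sorted_nodes[i:i+chunk] for i in range(0, len(nodes), chunk)]
--
--
-- def pick_color(graph, assigned, node, colors_available):
--     """First available colour held by no neighbour of node (None marks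
--     unassigned neighbours and can never collide with an int colour)."""
--     taken = {assigned.get(nb) for nb in graph[node]}
--     for c in colors_available:
--         if c not in taken:
--             return c
--     return None
--
--
-- def color_partition(graph, partition, colors_available, assigned):
--     for node in partition:
--         c = pick_color(graph, assigned, node, colors_available)
--         if c is not None:
--             assigned[node] = c
--     return assigned
--
--
-- def allocate_registers(instructions, live_ranges, num_regs=16):
--     graph = build_interference_graph(instructions, live_ranges)
--     nodes = list(live_ranges)
--
--     assigned = {}
--     colors = list(range(num_regs))
--
--     for part in spectral_partition(graph, nodes, k=num_regs // 4):
--         part_set = set(part)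
--         reserved = {assigned[b] for node in part
--                     for b in graph[node] if b not in part_set and b in assigned}
--         available = [c for c in colors if c not in reserved]
--         assigned = color_partition(graph, part, available, assigned)
--
--     return assigned
-- ===== Notes on version B (the rewrite author's own statement) =====
-- stated objective: alternative
-- what changed: Graph construction is a sweep line (sort intervals by start, test each only against a pruned 'active' list, adding both edge directions at once) instead of the all-pairs double loop; degrees are direct filter counts instead of set intersections; reserved boundary colours come from one flattened comprehension instead of a staged boundary-set pass; a node's colour avoids the filtered 'used' set by collecting every neighbour's raw assignment lookup (None included) and taking the first colour not taken.
import Mathlib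
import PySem

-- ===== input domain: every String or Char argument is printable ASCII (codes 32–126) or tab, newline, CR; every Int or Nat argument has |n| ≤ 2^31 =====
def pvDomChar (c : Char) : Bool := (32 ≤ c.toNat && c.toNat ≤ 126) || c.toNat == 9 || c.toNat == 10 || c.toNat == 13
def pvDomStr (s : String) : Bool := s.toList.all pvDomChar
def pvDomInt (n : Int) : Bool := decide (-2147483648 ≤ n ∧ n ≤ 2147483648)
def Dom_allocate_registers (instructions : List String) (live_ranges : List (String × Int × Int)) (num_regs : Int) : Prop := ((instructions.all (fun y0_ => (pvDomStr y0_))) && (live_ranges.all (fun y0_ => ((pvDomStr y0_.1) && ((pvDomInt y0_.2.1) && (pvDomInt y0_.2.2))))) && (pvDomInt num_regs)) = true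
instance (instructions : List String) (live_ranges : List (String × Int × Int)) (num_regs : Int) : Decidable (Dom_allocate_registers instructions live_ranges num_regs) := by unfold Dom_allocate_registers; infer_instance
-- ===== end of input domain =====

-- B rebuilds the interference graph with a sweep line (sort by start, prune an
-- 'active' list), counts degrees by a direct filter instead of a set intersection,
-- reserves boundary colours in one flattened comprehension, and picks a node's
-- colour from the raw neighbour-lookup set (None included) instead of the
-- filtered 'used' set.

-- ===== PORT A =====

-- inner loop of build_interference_graph: 'for other, (ostart, oend) in live_ranges.items(): …'
def pvGraphAddA (qs : List (String × Int × Int)) (g : PySem.Dict String (PySem.Set String)) (p : String × Int × Int) : PySem.Dict String (PySem.Set String) :=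
  qs.foldl (fun g q =>
    if p.1 ≠ q.1 ∧ ¬(p.2.2 < q.2.1 ∨ p.2.1 > q.2.2) then
      g.modify p.1 PySem.Set.empty (fun s => PySem.Set.add s q.1)
    else g) g

def pvBuildGraphA (lr : List (String × Int × Int)) : PySem.Dict String (PySem.Set String) :=
  lr.foldl (pvGraphAddA lr) PySem.Dict.empty

-- spectral_partition: degree dict via set intersection, sort, slice by range
def pvSpectralPartition (graph : PySem.Dict String (PySem.Set String)) (nodes : List String) (k : Int) : List (List String) :=
  if (nodes.length : Int) ≤ k then nodes.map (fun n => [n])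
  else
    let degrees : PySem.Dict String Int :=
      nodes.foldl (fun d n => d.insert n (PySem.Set.len (PySem.Set.inter (graph.getD n PySem.Set.empty) (PySem.Set.ofList nodes)))) PySem.Dict.empty
    let sorted_nodes := PySem.List.sorted nodes (fun n => degrees.getD n 0)
    let chunk := PySem.Int.floordiv (nodes.length : Int) k
    (PySem.List.pyRange 0 (nodes.length : Int) chunk).map (fun i => PySem.List.slice sorted_nodes (some i) (some (i + chunk)))

-- color_partition: build the 'used' set, then the for/break colour search is List.find?
def pvColorPartition (graph : PySem.Dict String (PySem.Set String)) (part : List String) (colors : List Int) (assigned : PySem.Dict String Int) : PySem.Dict String Int :=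
  part.foldl (fun assigned node =>
    let used : PySem.Set Int := PySem.Set.ofList
      (((graph.getD node PySem.Set.empty).filter (fun ne => assigned.contains ne)).map (fun ne => assigned.getD ne 0))
    match colors.find? (fun c => !(PySem.Set.contains used c)) with
    | some c => assigned.insert node c
    | none => assigned) assigned

-- body of allocate_registers after the graph is built: boundary set, reserved set, colour
def pvAllocate (graph : PySem.Dict String (PySem.Set String)) (nodes : List String) (num_regs : Int) : List (String × Int) :=
  let partitions := pvSpectralPartition graph nodes (PySem.Int.floordiv num_regs 4)
  let colors := PySem.List.pyRange 0 num_regs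
  (partitions.foldl (fun assigned part =>
    let boundary : PySem.Set String := part.foldl (fun b node =>
      PySem.Set.update b (PySem.Set.diff (graph.getD node PySem.Set.empty) (PySem.Set.ofList part))) PySem.Set.empty
    let reserved : PySem.Set Int := PySem.Set.ofList
      ((boundary.filter (fun b => assigned.contains b)).map (fun b => assigned.getD b 0))
    let available := colors.filter (fun c => !(PySem.Set.contains reserved c))
    pvColorPartition graph part available assigned) PySem.Dict.empty).items

def allocate_registers (instructions : List String) (live_ranges : List (String × Int × Int)) (num_regs : Int) : List (String × Int) :=
  pvAllocate (pvBuildGraphA live_ranges) (live_ranges.map (fun p => p.1)) num_regs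

-- ===== PORT B =====

-- one sweep step: prune 'active', add mutual edges with the still-open overlapping intervals, open t
def pvSweep (st : (List (String × Int × Int)) × PySem.Dict String (PySem.Set String)) (t : String × Int × Int) : (List (String × Int × Int)) × PySem.Dict String (PySem.Set String) :=
  let active := st.1.filter (fun u => decide (t.2.1 ≤ u.2.2))
  let g := active.foldl (fun g u =>
    if u.2.1 ≤ t.2.2 then
      (g.modify u.1 PySem.Set.empty (fun s => PySem.Set.add s t.1)).modify t.1 PySem.Set.empty (fun s => PySem.Set.add s u.1)
    else g) st.2
  (active ++ [t], g)

def pvBuildGraphB (lr : List (String × Int × Int)) : PySem.Dict String (PySem.Set String) :=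
  ((PySem.List.sorted lr (fun t => t.2.1)).foldl pvSweep ([], PySem.Dict.empty)).2

-- degrees[n] = len([x for x in graph[n] if x in node_set])
def pvDegreesB (graph : PySem.Dict String (PySem.Set String)) (nodes : List String) : PySem.Dict String Int :=
  nodes.foldl (fun d n =>
    d.insert n (((graph.getD n PySem.Set.empty).filter (fun x => PySem.Set.contains (PySem.Set.ofList nodes) x)).length : Int)) PySem.Dict.empty

def pvSpectralB (graph : PySem.Dict String (PySem.Set String)) (nodes : List String) (k : Int) : List (List String) :=
  if (nodes.length : Int) ≤ k then nodes.map (fun n => [n])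
  else
    let sorted_nodes := PySem.List.sorted nodes (fun n => (pvDegreesB graph nodes).getD n 0)
    let chunk := PySem.Int.floordiv (nodes.length : Int) k
    (PySem.List.pyRange 0 (nodes.length : Int) chunk).map (fun i => PySem.List.slice sorted_nodes (some i) (some (i + chunk)))

-- taken = {assigned.get(nb) for nb in graph[node]} (None = unassigned); first colour not taken
def pvPickColor (graph : PySem.Dict String (PySem.Set String)) (assigned : PySem.Dict String Int) (node : String) (colors : List Int) : Option Int :=
  colors.find? (fun c => !(PySem.Set.contains (PySem.Set.ofList ((graph.getD node PySem.Set.empty).map (fun nb => assigned.get? nb))) (some c)))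

def pvColorPartB (graph : PySem.Dict String (PySem.Set String)) (part : List String) (colors : List Int) (assigned : PySem.Dict String Int) : PySem.Dict String Int :=
  part.foldl (fun assigned node =>
    match pvPickColor graph assigned node colors with
    | some c => assigned.insert node c
    | none => assigned) assigned

-- {assigned[b] for node in part for b in graph[node] if b not in part_set and b in assigned}
def pvReservedB (graph : PySem.Dict String (PySem.Set String)) (part : List String) (assigned : PySem.Dict String Int) : PySem.Set Int :=
  PySem.Set.ofList (part.flatMap (fun node =>
    ((graph.getD node PySem.Set.empty).filter (fun b => !(PySem.Set.contains (PySem.Set.ofList part) b) && assigned.contains b)).map (fun b => assigned.getD b 0)))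

def pvAllocateB (graph : PySem.Dict String (PySem.Set String)) (nodes : List String) (num_regs : Int) : List (String × Int) :=
  let colors := PySem.List.pyRange 0 num_regs
  ((pvSpectralB graph nodes (PySem.Int.floordiv num_regs 4)).foldl (fun assigned part =>
    pvColorPartB graph part (colors.filter (fun c => !(PySem.Set.contains (pvReservedB graph part assigned) c))) assigned) PySem.Dict.empty).items

def allocate_registers_alt (instructions : List String) (live_ranges : List (String × Int × Int)) (num_regs : Int) : List (String × Int) :=
  pvAllocateB (pvBuildGraphB live_ranges) (live_ranges.map (fun p => p.1)) num_regs

-- ===== PRECONDITION & SPEC =====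
-- Pre_ excludes (a) association lists with duplicate keys, which do not represent any Python
-- dict input, and (b) the inputs where A raises: num_regs//4 = 0 with a nonempty dict
-- (ZeroDivisionError in spectral_partition) and num_regs < 0 with an empty dict
-- (range() step 0 ValueError).
def Pre_allocate_registers (instructions : List String) (live_ranges : List (String × Int × Int)) (num_regs : Int) : Prop :=
  (live_ranges.map (fun p => p.1)).Nodup ∧
  ¬((PySem.Int.floordiv num_regs 4 = 0 ∧ live_ranges ≠ []) ∨ (PySem.Int.floordiv num_regs 4 < 0 ∧ live_ranges = []))
instance (instructions : List String) (live_ranges : List (String × Int × Int)) (num_regs : Int) : Decidable (Pre_allocate_registers instructions live_ranges num_regs) := by unfold Pre_allocate_registers; infer_instance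

def pvWitness_allocate_registers : List String × (List (String × Int × Int)) × Int :=
  (["ld"], [("a", 0, 5), ("b", 3, 9), ("c", 10, 12)], 16)

def Spec_allocate_registers (instructions : List String) (live_ranges : List (String × Int × Int)) (num_regs : Int) (out : List (String × Int)) : Prop := out = allocate_registers_alt instructions live_ranges num_regs
instance (instructions : List String) (live_ranges : List (String × Int × Int)) (num_regs : Int) (out : List (String × Int)) : Decidable (Spec_allocate_registers instructions live_ranges num_regs out) := by unfold Spec_allocate_registers; infer_instance

-- ===== CLAIM (what is proved, stated in full; the proofs are below) =====
def Claim_equal_allocate_registers : Prop := ∀ (instructions : List String) (live_ranges : List (String × Int × Int)) (num_regs : Int), Dom_allocate_registers instructions live_ranges num_regs → Pre_allocate_registers instructions live_ranges num_regs → Spec_allocate_registers instructions live_ranges num_regs (allocate_registers instructions live_ranges num_regs)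

-- ===== LEMMAS AND PROOFS =====

def pvEdgeA (lr : List (String × Int × Int)) (v u : String) : Prop :=
  ∃ p ∈ lr, v = p.1 ∧ ∃ q ∈ lr, q.1 = u ∧ p.1 ≠ q.1 ∧ ¬(p.2.2 < q.2.1 ∨ p.2.1 > q.2.2)

theorem pv_memA_batch (qs : List (String × Int × Int)) (g : PySem.Dict String (PySem.Set String))
    (p : String × Int × Int) (v u : String) :
    (u ∈ (pvGraphAddA qs g p).getD v PySem.Set.empty) ↔
      u ∈ g.getD v PySem.Set.empty ∨
        (v = p.1 ∧ ∃ q ∈ qs, q.1 = u ∧ p.1 ≠ q.1 ∧ ¬(p.2.2 < q.2.1 ∨ p.2.1 > q.2.2)) := by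
  induction qs generalizing g with
  | nil => simp [pvGraphAddA]
  | cons q qs ih =>
    have hstep : pvGraphAddA (q :: qs) g p = pvGraphAddA qs
        (if p.1 ≠ q.1 ∧ ¬(p.2.2 < q.2.1 ∨ p.2.1 > q.2.2) then
          g.modify p.1 PySem.Set.empty (fun s => PySem.Set.add s q.1)
        else g) p := rfl
    rw [hstep, ih]
    by_cases hc : p.1 ≠ q.1 ∧ ¬(p.2.2 < q.2.1 ∨ p.2.1 > q.2.2)
    · rw [if_pos hc, PySem.Dict.getD_modify]
      by_cases hv : v = p.1
      · subst hv
        rw [if_pos rfl]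
        simp only [PySem.Set.mem_add, List.exists_mem_cons_iff]
        constructor
        · rintro ((h | h) | h)
          · exact Or.inl h
          · exact Or.inr ⟨trivial, Or.inl ⟨h.symm, hc⟩⟩
          · exact Or.inr ⟨trivial, Or.inr h.2⟩
        · rintro (h | ⟨-, (⟨hqu, -⟩ | h)⟩)
          · exact Or.inl (Or.inl h)
          · exact Or.inl (Or.inr hqu.symm)
          · exact Or.inr ⟨trivial, h⟩
      · rw [if_neg hv]
        simp only [List.exists_mem_cons_iff]
        constructor
        · rintro (h | h)
          · exact Or.inl h
          · exact Or.inr ⟨h.1, Or.inr h.2⟩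
        · rintro (h | ⟨hv', (h | h)⟩)
          · exact Or.inl h
          · exact absurd hv' hv
          · exact Or.inr ⟨hv', h⟩
    · rw [if_neg hc]
      simp only [List.exists_mem_cons_iff]
      constructor
      · rintro (h | h)
        · exact Or.inl h
        · exact Or.inr ⟨h.1, Or.inr h.2⟩
      · rintro (h | ⟨hv', (h | h)⟩)
        · exact Or.inl h
        · exact absurd ⟨h.2.1, h.2.2⟩ hc
        · exact Or.inr ⟨hv', h⟩

theorem pv_memA (ps lr : List (String × Int × Int)) (g : PySem.Dict String (PySem.Set String)) (v u : String) :
    (u ∈ (ps.foldl (pvGraphAddA lr) g).getD v PySem.Set.empty) ↔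
      u ∈ g.getD v PySem.Set.empty ∨
        ∃ p ∈ ps, v = p.1 ∧ ∃ q ∈ lr, q.1 = u ∧ p.1 ≠ q.1 ∧ ¬(p.2.2 < q.2.1 ∨ p.2.1 > q.2.2) := by
  induction ps generalizing g with
  | nil => simp
  | cons p ps ih =>
    rw [List.foldl_cons, ih, pv_memA_batch]
    simp only [List.exists_mem_cons_iff]
    exact or_assoc

theorem pv_memA_graph (lr : List (String × Int × Int)) (v u : String) :
    (u ∈ (pvBuildGraphA lr).getD v PySem.Set.empty) ↔ pvEdgeA lr v u := by
  rw [pvBuildGraphA, pv_memA, pvEdgeA]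
  simp [PySem.Dict.getD_empty]

theorem pv_nodup_modify_add (g : PySem.Dict String (PySem.Set String))
    (h : ∀ w, (g.getD w PySem.Set.empty).Nodup) (k x : String) :
    ∀ w, ((g.modify k PySem.Set.empty (fun s => PySem.Set.add s x)).getD w PySem.Set.empty).Nodup := by
  intro w
  rw [PySem.Dict.getD_modify]
  split
  · exact PySem.Set.nodup_add _ _ (h k)
  · exact h w

theorem pv_nodupA_batch (qs : List (String × Int × Int)) (g : PySem.Dict String (PySem.Set String))
    (p : String × Int × Int) (h : ∀ w, (g.getD w PySem.Set.empty).Nodup) :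
    ∀ w, ((pvGraphAddA qs g p).getD w PySem.Set.empty).Nodup := by
  induction qs generalizing g with
  | nil => exact h
  | cons q qs ih =>
    have hstep : pvGraphAddA (q :: qs) g p = pvGraphAddA qs
        (if p.1 ≠ q.1 ∧ ¬(p.2.2 < q.2.1 ∨ p.2.1 > q.2.2) then
          g.modify p.1 PySem.Set.empty (fun s => PySem.Set.add s q.1)
        else g) p := rfl
    rw [hstep]
    apply ih
    split
    · exact pv_nodup_modify_add g h _ _
    · exact h

theorem pv_nodupA (lr : List (String × Int × Int)) :
    ∀ w, ((pvBuildGraphA lr).getD w PySem.Set.empty).Nodup := by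
  have main : ∀ (ps : List (String × Int × Int)) (g : PySem.Dict String (PySem.Set String)),
      (∀ w, (g.getD w PySem.Set.empty).Nodup) →
      ∀ w, ((ps.foldl (pvGraphAddA lr) g).getD w PySem.Set.empty).Nodup := by
    intro ps
    induction ps with
    | nil => intro g h; exact h
    | cons p ps ih =>
      intro g h
      rw [List.foldl_cons]
      exact ih _ (pv_nodupA_batch lr g p h)
  exact main lr PySem.Dict.empty (by intro w; rw [PySem.Dict.getD_empty]; exact List.nodup_nil)

def pvOvl (a r : String × Int × Int) : Prop := r.2.1 ≤ a.2.2 ∧ a.2.1 ≤ r.2.2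

def pvCrossB (active rest : List (String × Int × Int)) (v u : String) : Prop :=
  ∃ a ∈ active, ∃ r ∈ rest, pvOvl a r ∧ ((v = a.1 ∧ u = r.1) ∨ (v = r.1 ∧ u = a.1))

def pvInnerB (rest : List (String × Int × Int)) (v u : String) : Prop :=
  ∃ p q, [p, q].Sublist rest ∧ pvOvl p q ∧ ((v = p.1 ∧ u = q.1) ∨ (v = q.1 ∧ u = p.1))

theorem pv_memB_batch (as : List (String × Int × Int)) (t : String × Int × Int)
    (g : PySem.Dict String (PySem.Set String)) (v u : String) :
    (u ∈ (as.foldl (fun g u' =>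
        if u'.2.1 ≤ t.2.2 then
          (g.modify u'.1 PySem.Set.empty (fun s => PySem.Set.add s t.1)).modify t.1 PySem.Set.empty (fun s => PySem.Set.add s u'.1)
        else g) g).getD v PySem.Set.empty) ↔
      u ∈ g.getD v PySem.Set.empty ∨
        ∃ a ∈ as, a.2.1 ≤ t.2.2 ∧ ((v = a.1 ∧ u = t.1) ∨ (v = t.1 ∧ u = a.1)) := by
  induction as generalizing g with
  | nil => simp
  | cons a as ih =>
    rw [List.foldl_cons, ih]
    simp only [List.exists_mem_cons_iff]
    by_cases hc : a.2.1 ≤ t.2.2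
    · rw [if_pos hc]
      simp only [PySem.Dict.getD_modify]
      split_ifs <;> simp_all <;> try exact or_assoc
    · rw [if_neg hc]
      constructor
      · rintro (h | h)
        · exact Or.inl h
        · exact Or.inr (Or.inr h)
      · rintro (h | (⟨hc', -⟩ | h))
        · exact Or.inl h
        · exact absurd hc' hc
        · exact Or.inr h

theorem pv_memB_sweep (rest : List (String × Int × Int)) :
    ∀ (active : List (String × Int × Int)) (g : PySem.Dict String (PySem.Set String)),
      rest.Pairwise (fun a b => a.2.1 ≤ b.2.1) → ∀ v u,
      (u ∈ ((rest.foldl pvSweep (active, g)).2).getD v PySem.Set.empty) ↔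
        u ∈ g.getD v PySem.Set.empty ∨ pvCrossB active rest v u ∨ pvInnerB rest v u := by
  induction rest with
  | nil =>
    intro active g _ v u
    simp [pvCrossB, pvInnerB]
  | cons t rest ih =>
    intro active g hp v u
    have hhead : ∀ r ∈ rest, t.2.1 ≤ r.2.1 := fun r hr => List.rel_of_pairwise_cons hp hr
    have htail : rest.Pairwise (fun a b => a.2.1 ≤ b.2.1) := hp.of_cons
    rw [List.foldl_cons]
    have hsw : pvSweep (active, g) t =
        (active.filter (fun u => decide (t.2.1 ≤ u.2.2)) ++ [t],
         (active.filter (fun u => decide (t.2.1 ≤ u.2.2))).foldl (fun g u =>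
           if u.2.1 ≤ t.2.2 then
             (g.modify u.1 PySem.Set.empty (fun s => PySem.Set.add s t.1)).modify t.1 PySem.Set.empty (fun s => PySem.Set.add s u.1)
           else g) g) := rfl
    rw [hsw, ih _ _ htail, pv_memB_batch]
    have hmemA : ∀ a, a ∈ active.filter (fun u => decide (t.2.1 ≤ u.2.2)) ↔ a ∈ active ∧ t.2.1 ≤ a.2.2 := by
      intro a; simp [List.mem_filter]
    have F2 : (∃ a ∈ active.filter (fun u => decide (t.2.1 ≤ u.2.2)), a.2.1 ≤ t.2.2 ∧ ((v = a.1 ∧ u = t.1) ∨ (v = t.1 ∧ u = a.1)))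
        ↔ ∃ a ∈ active, pvOvl a t ∧ ((v = a.1 ∧ u = t.1) ∨ (v = t.1 ∧ u = a.1)) := by
      constructor
      · rintro ⟨a, ha, h1, h2⟩
        exact ⟨a, (hmemA a).1 ha |>.1, ⟨((hmemA a).1 ha).2, h1⟩, h2⟩
      · rintro ⟨a, ha, h1, h2⟩
        exact ⟨a, (hmemA a).2 ⟨ha, h1.1⟩, h1.2, h2⟩
    have F3 : pvCrossB (active.filter (fun u => decide (t.2.1 ≤ u.2.2)) ++ [t]) rest v u
        ↔ pvCrossB active rest v u ∨ (∃ r ∈ rest, pvOvl t r ∧ ((v = t.1 ∧ u = r.1) ∨ (v = r.1 ∧ u = t.1))) := by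
      unfold pvCrossB
      constructor
      · rintro ⟨a, ha, r, hr, hovl, hor⟩
        rcases List.mem_append.1 ha with ha' | ha'
        · exact Or.inl ⟨a, ((hmemA a).1 ha').1, r, hr, hovl, hor⟩
        · rcases List.mem_singleton.1 ha' with rfl
          exact Or.inr ⟨r, hr, hovl, hor⟩
      · rintro (⟨a, ha, r, hr, hovl, hor⟩ | ⟨r, hr, hovl, hor⟩)
        · refine ⟨a, List.mem_append.2 (Or.inl ((hmemA a).2 ⟨ha, ?_⟩)), r, hr, hovl, hor⟩
          exact le_trans (hhead r hr) hovl.1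
        · exact ⟨t, List.mem_append.2 (Or.inr (List.mem_singleton.2 rfl)), r, hr, hovl, hor⟩
    have F6 : pvInnerB (t :: rest) v u
        ↔ (∃ r ∈ rest, pvOvl t r ∧ ((v = t.1 ∧ u = r.1) ∨ (v = r.1 ∧ u = t.1))) ∨ pvInnerB rest v u := by
      unfold pvInnerB
      constructor
      · rintro ⟨p, q, hsub, hovl, hor⟩
        rcases List.sublist_cons_iff.1 hsub with hsub' | ⟨r0, heq, hsub'⟩
        · exact Or.inr ⟨p, q, hsub', hovl, hor⟩
        · injection heq with h1 h2
          subst h1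
          rw [← h2] at hsub'
          exact Or.inl ⟨q, List.singleton_sublist.1 hsub', hovl, hor⟩
      · rintro (⟨r, hr, hovl, hor⟩ | ⟨p, q, hsub, hovl, hor⟩)
        · exact ⟨t, r, List.cons_sublist_cons.2 (List.singleton_sublist.2 hr), hovl, hor⟩
        · exact ⟨p, q, hsub.cons t, hovl, hor⟩
    have F7 : pvCrossB active (t :: rest) v u
        ↔ (∃ a ∈ active, pvOvl a t ∧ ((v = a.1 ∧ u = t.1) ∨ (v = t.1 ∧ u = a.1))) ∨ pvCrossB active rest v u := by
      unfold pvCrossB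
      constructor
      · rintro ⟨a, ha, r, hr, hovl, hor⟩
        rcases List.mem_cons.1 hr with rfl | hr'
        · exact Or.inl ⟨a, ha, hovl, hor⟩
        · exact Or.inr ⟨a, ha, r, hr', hovl, hor⟩
      · rintro (⟨a, ha, hovl, hor⟩ | ⟨a, ha, r, hr, hovl, hor⟩)
        · exact ⟨a, ha, t, List.mem_cons_self, hovl, hor⟩
        · exact ⟨a, ha, r, List.mem_cons_of_mem _ hr, hovl, hor⟩
    rw [F2, F3, F6, F7]
    constructor
    · rintro ((a | b) | (c | d) | e)
      · exact Or.inl a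
      · exact Or.inr (Or.inl (Or.inl b))
      · exact Or.inr (Or.inl (Or.inr c))
      · exact Or.inr (Or.inr (Or.inl d))
      · exact Or.inr (Or.inr (Or.inr e))
    · rintro (a | (b | c) | (d | e))
      · exact Or.inl (Or.inl a)
      · exact Or.inl (Or.inr b)
      · exact Or.inr (Or.inl (Or.inl c))
      · exact Or.inr (Or.inl (Or.inr d))
      · exact Or.inr (Or.inr e)

theorem pv_memB_graph (lr : List (String × Int × Int)) (v u : String) :
    (u ∈ (pvBuildGraphB lr).getD v PySem.Set.empty) ↔ pvInnerB (PySem.List.sorted lr (fun t => t.2.1)) v u := by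
  rw [pvBuildGraphB, pv_memB_sweep _ _ _ (PySem.List.sorted_pairwise lr (fun t => t.2.1))]
  simp [pvCrossB, PySem.Dict.getD_empty]

theorem pv_nodupB_batch (as : List (String × Int × Int)) (t : String × Int × Int)
    (g : PySem.Dict String (PySem.Set String)) (h : ∀ w, (g.getD w PySem.Set.empty).Nodup) :
    ∀ w, ((as.foldl (fun g u' =>
        if u'.2.1 ≤ t.2.2 then
          (g.modify u'.1 PySem.Set.empty (fun s => PySem.Set.add s t.1)).modify t.1 PySem.Set.empty (fun s => PySem.Set.add s u'.1)
        else g) g).getD w PySem.Set.empty).Nodup := by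
  induction as generalizing g with
  | nil => exact h
  | cons a as ih =>
    rw [List.foldl_cons]
    apply ih
    split
    · exact pv_nodup_modify_add _ (pv_nodup_modify_add _ h _ _) _ _
    · exact h

theorem pv_nodupB_sweep (rest : List (String × Int × Int)) :
    ∀ (active : List (String × Int × Int)) (g : PySem.Dict String (PySem.Set String)),
      (∀ w, (g.getD w PySem.Set.empty).Nodup) →
      ∀ w, (((rest.foldl pvSweep (active, g)).2).getD w PySem.Set.empty).Nodup := by
  induction rest with
  | nil => intro active g h; exact h
  | cons t rest ih =>
    intro active g h
    rw [List.foldl_cons]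
    exact ih _ _ (pv_nodupB_batch _ t g h)

theorem pv_nodupB (lr : List (String × Int × Int)) :
    ∀ w, ((pvBuildGraphB lr).getD w PySem.Set.empty).Nodup := by
  rw [pvBuildGraphB]
  exact pv_nodupB_sweep _ _ _ (by intro w; rw [PySem.Dict.getD_empty]; exact List.nodup_nil)

theorem pv_pair_sublist {α : Type} (L : List α) (p q : α) (hp : p ∈ L) (hq : q ∈ L) (hne : p ≠ q) :
    [p, q].Sublist L ∨ [q, p].Sublist L := by
  induction L with
  | nil => cases hp
  | cons x L ih =>
    rcases List.mem_cons.1 hp with rfl | hp'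
    · have hq' : q ∈ L := by
        rcases List.mem_cons.1 hq with rfl | h
        · exact absurd rfl hne
        · exact h
      exact Or.inl (List.cons_sublist_cons.2 (List.singleton_sublist.2 hq'))
    · rcases List.mem_cons.1 hq with rfl | hq'
      · have hp'' : p ∈ L := hp'
        exact Or.inr (List.cons_sublist_cons.2 (List.singleton_sublist.2 hp''))
      · rcases ih hp' hq' with h | h
        · exact Or.inl (h.cons x)
        · exact Or.inr (h.cons x)

def pvGEq (g1 g2 : PySem.Dict String (PySem.Set String)) : Prop :=
  ∀ v, (∀ u, u ∈ g1.getD v PySem.Set.empty ↔ u ∈ g2.getD v PySem.Set.empty) ∧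
    (g1.getD v PySem.Set.empty).Nodup ∧ (g2.getD v PySem.Set.empty).Nodup

theorem pv_edge_iff (lr : List (String × Int × Int)) (hnd : (lr.map (fun p => p.1)).Nodup) (v u : String) :
    pvEdgeA lr v u ↔ pvInnerB (PySem.List.sorted lr (fun t => t.2.1)) v u := by
  have hperm : (PySem.List.sorted lr (fun t => t.2.1)).Perm lr := PySem.List.sorted_perm lr _ false
  have hndL : ((PySem.List.sorted lr (fun t => t.2.1)).map (fun p => p.1)).Nodup :=
    ((hperm.map (fun p => p.1)).nodup_iff).2 hnd
  constructor
  · rintro ⟨p, hp, hv, q, hq, hq1, hne, hno⟩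
    have hpq : p ≠ q := fun h => hne (by rw [h])
    have hpL : p ∈ PySem.List.sorted lr (fun t => t.2.1) := (PySem.List.mem_sorted _ _ _ _).2 hp
    have hqL : q ∈ PySem.List.sorted lr (fun t => t.2.1) := (PySem.List.mem_sorted _ _ _ _).2 hq
    rw [not_or] at hno
    have hno1 := hno.1
    have hno2 := hno.2
    rw [not_lt] at hno1
    rw [not_lt] at hno2
    rcases pv_pair_sublist _ p q hpL hqL hpq with hsub | hsub
    · exact ⟨p, q, hsub, ⟨by omega, by omega⟩, Or.inl ⟨hv, hq1.symm⟩⟩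
    · exact ⟨q, p, hsub, ⟨by omega, by omega⟩, Or.inr ⟨hv, hq1.symm⟩⟩
  · rintro ⟨p, q, hsub, hovl, hor⟩
    have hpL := hsub.subset (List.mem_cons_self)
    have hqL := hsub.subset (List.mem_cons_of_mem _ (List.mem_cons_self))
    have hp : p ∈ lr := hperm.subset hpL
    have hq : q ∈ lr := hperm.subset hqL
    have hne : p.1 ≠ q.1 := by
      have h2 : [p.1, q.1].Sublist ((PySem.List.sorted lr (fun t => t.2.1)).map (fun p => p.1)) := by
        have := hsub.map (fun p : String × Int × Int => p.1)
        simpa using this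
      have h3 : ([p.1, q.1] : List String).Nodup := h2.nodup hndL
      simp only [List.nodup_cons, List.mem_singleton] at h3
      exact h3.1
    rcases hovl with ⟨h1, h2⟩
    rcases hor with ⟨rfl, rfl⟩ | ⟨rfl, rfl⟩
    · exact ⟨p, hp, rfl, q, hq, rfl, hne, by omega⟩
    · exact ⟨q, hq, rfl, p, hp, rfl, hne.symm, by omega⟩

theorem pv_geq (lr : List (String × Int × Int)) (hnd : (lr.map (fun p => p.1)).Nodup) :
    pvGEq (pvBuildGraphA lr) (pvBuildGraphB lr) := by
  intro v
  refine ⟨fun u => ?_, pv_nodupA lr v, pv_nodupB lr v⟩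
  rw [pv_memA_graph, pv_memB_graph, pv_edge_iff lr hnd]

theorem pv_len_inter_congr (s1 s2 t : PySem.Set String) (h1 : s1.Nodup) (h2 : s2.Nodup)
    (hm : ∀ u, u ∈ s1 ↔ u ∈ s2) : PySem.Set.len (PySem.Set.inter s1 t) = PySem.Set.len (PySem.Set.inter s2 t) := by
  have hperm : (PySem.Set.inter s1 t).Perm (PySem.Set.inter s2 t) := by
    rw [List.perm_ext_iff_of_nodup (PySem.Set.nodup_inter _ _ h1) (PySem.Set.nodup_inter _ _ h2)]
    intro a
    rw [PySem.Set.mem_inter, PySem.Set.mem_inter]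
    exact and_congr_left (fun _ => hm a)
  simp [PySem.Set.len, hperm.length_eq]

-- A's set-intersection degree equals B's direct filter count
theorem pv_degree_cross (s1 s2 : PySem.Set String) (nodes : List String)
    (h1 : s1.Nodup) (h2 : s2.Nodup) (hm : ∀ u, u ∈ s1 ↔ u ∈ s2) :
    PySem.Set.len (PySem.Set.inter s1 (PySem.Set.ofList nodes)) =
      ((s2.filter (fun x => PySem.Set.contains (PySem.Set.ofList nodes) x)).length : Int) := by
  rw [pv_len_inter_congr s1 s2 (PySem.Set.ofList nodes) h1 h2 hm]
  rfl

theorem pv_spectral_cross (g1 g2 : PySem.Dict String (PySem.Set String)) (h : pvGEq g1 g2)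
    (nodes : List String) (k : Int) : pvSpectralPartition g1 nodes k = pvSpectralB g2 nodes k := by
  unfold pvSpectralPartition pvSpectralB pvDegreesB
  have hdeg : (fun (d : PySem.Dict String Int) n => d.insert n (PySem.Set.len (PySem.Set.inter (g1.getD n PySem.Set.empty) (PySem.Set.ofList nodes))))
      = (fun (d : PySem.Dict String Int) n => d.insert n (((g2.getD n PySem.Set.empty).filter (fun x => PySem.Set.contains (PySem.Set.ofList nodes) x)).length : Int)) := by
    funext d n
    rw [pv_degree_cross _ _ nodes (h n).2.1 (h n).2.2 (h n).1]
  rw [hdeg]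

theorem pv_get?_some_iff (assigned : PySem.Dict String Int) (nb : String) (c : Int) :
    assigned.get? nb = some c ↔ (assigned.contains nb = true ∧ assigned.getD nb 0 = c) := by
  rw [PySem.Dict.contains_eq_isSome_get?, PySem.Dict.getD_eq_get?_getD]
  cases h : assigned.get? nb <;> simp

-- 'c not in used' (A) says exactly 'c not taken by any neighbour' (B)
theorem pv_pred_cross (s1 s2 : PySem.Set String) (hm : ∀ u, u ∈ s1 ↔ u ∈ s2)
    (assigned : PySem.Dict String Int) (c : Int) :
    (!(PySem.Set.contains (PySem.Set.ofList ((s1.filter (fun ne => assigned.contains ne)).map (fun ne => assigned.getD ne 0))) c))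
      = (!(PySem.Set.contains (PySem.Set.ofList (s2.map (fun nb => assigned.get? nb))) (some c))) := by
  have hcc : (PySem.Set.contains (PySem.Set.ofList ((s1.filter (fun ne => assigned.contains ne)).map (fun ne => assigned.getD ne 0))) c)
      = (PySem.Set.contains (PySem.Set.ofList (s2.map (fun nb => assigned.get? nb))) (some c)) := by
    rw [← Bool.coe_iff_coe, PySem.Set.contains_iff, PySem.Set.contains_iff,
      PySem.Set.mem_ofList, PySem.Set.mem_ofList]
    simp only [List.mem_map, List.mem_filter]
    constructor
    · rintro ⟨ne, ⟨hne, hct⟩, rfl⟩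
      exact ⟨ne, (hm ne).1 hne, (pv_get?_some_iff assigned ne _).2 ⟨hct, rfl⟩⟩
    · rintro ⟨nb, hnb, hsome⟩
      rcases (pv_get?_some_iff assigned nb c).1 hsome with ⟨hct, hgd⟩
      exact ⟨nb, ⟨(hm nb).2 hnb, hct⟩, hgd⟩
  rw [hcc]

theorem pv_color_cross (g1 g2 : PySem.Dict String (PySem.Set String)) (h : pvGEq g1 g2)
    (part : List String) (colors : List Int) (assigned : PySem.Dict String Int) :
    pvColorPartition g1 part colors assigned = pvColorPartB g2 part colors assigned := by
  unfold pvColorPartition pvColorPartB pvPickColor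
  induction part generalizing assigned with
  | nil => rfl
  | cons node part ih =>
    rw [List.foldl_cons, List.foldl_cons]
    have hpred : (fun c => !(PySem.Set.contains (PySem.Set.ofList (((g1.getD node PySem.Set.empty).filter (fun ne => assigned.contains ne)).map (fun ne => assigned.getD ne 0))) c))
        = (fun c => !(PySem.Set.contains (PySem.Set.ofList ((g2.getD node PySem.Set.empty).map (fun nb => assigned.get? nb))) (some c))) := by
      funext c
      exact pv_pred_cross _ _ (h node).1 assigned c
    simp only [hpred]
    exact ih _

theorem pv_mem_boundary (g : PySem.Dict String (PySem.Set String)) (part part' : List String)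
    (init : PySem.Set String) (b : String) :
    (b ∈ part.foldl (fun bs node =>
      PySem.Set.update bs (PySem.Set.diff (g.getD node PySem.Set.empty) (PySem.Set.ofList part'))) init) ↔
    b ∈ init ∨ ∃ node ∈ part, b ∈ g.getD node PySem.Set.empty ∧ b ∉ part' := by
  induction part generalizing init with
  | nil => simp
  | cons node part ih =>
    rw [List.foldl_cons, ih]
    rw [PySem.Set.mem_update, PySem.Set.mem_diff, PySem.Set.mem_ofList, List.exists_mem_cons_iff]
    tauto

-- A's boundary-then-reserved set answers membership exactly like B's flattened comprehension
theorem pv_reserved_cross (g1 g2 : PySem.Dict String (PySem.Set String)) (h : pvGEq g1 g2)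
    (part : List String) (assigned : PySem.Dict String Int) (c : Int) :
    PySem.Set.contains (PySem.Set.ofList
      (((part.foldl (fun b node => PySem.Set.update b (PySem.Set.diff (g1.getD node PySem.Set.empty) (PySem.Set.ofList part))) PySem.Set.empty).filter
          (fun b => assigned.contains b)).map (fun b => assigned.getD b 0))) c
      = PySem.Set.contains (pvReservedB g2 part assigned) c := by
  unfold pvReservedB
  rw [← Bool.coe_iff_coe, PySem.Set.contains_iff, PySem.Set.contains_iff,
    PySem.Set.mem_ofList, PySem.Set.mem_ofList]
  have hmem : ∀ b, (PySem.Set.contains (PySem.Set.ofList part) b = false) ↔ b ∉ part := by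
    intro b
    rw [← Bool.not_eq_true, PySem.Set.contains_iff, PySem.Set.mem_ofList]
  simp only [List.mem_map, List.mem_filter, List.mem_flatMap, pv_mem_boundary,
    Bool.and_eq_true, Bool.not_eq_true', hmem]
  constructor
  · rintro ⟨b, ⟨hb, hct⟩, rfl⟩
    rcases hb with hb | ⟨node, hn, hbg, hbp⟩
    · cases hb
    · exact ⟨node, hn, b, ⟨((h node).1 b).1 hbg, hbp, hct⟩, rfl⟩
  · rintro ⟨node, hn, b, ⟨hbg, hbp, hct⟩, rfl⟩
    exact ⟨b, ⟨Or.inr ⟨node, hn, ((h node).1 b).2 hbg, hbp⟩, hct⟩, rfl⟩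

theorem pv_alloc_cross (g1 g2 : PySem.Dict String (PySem.Set String)) (h : pvGEq g1 g2)
    (nodes : List String) (num_regs : Int) : pvAllocate g1 nodes num_regs = pvAllocateB g2 nodes num_regs := by
  unfold pvAllocate pvAllocateB
  rw [pv_spectral_cross g1 g2 h nodes]
  apply congrArg PySem.Dict.items
  apply PySem.List.foldl_congr_mem
  intro assigned part _
  show pvColorPartition g1 part
      ((PySem.List.pyRange 0 num_regs).filter (fun c => !(PySem.Set.contains (PySem.Set.ofList
        (((part.foldl (fun b node => PySem.Set.update b (PySem.Set.diff (g1.getD node PySem.Set.empty) (PySem.Set.ofList part))) PySem.Set.empty).filter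
            (fun b => assigned.contains b)).map (fun b => assigned.getD b 0))) c))) assigned
      = pvColorPartB g2 part ((PySem.List.pyRange 0 num_regs).filter (fun c => !(PySem.Set.contains (pvReservedB g2 part assigned) c))) assigned
  have havail : ((PySem.List.pyRange 0 num_regs).filter (fun c => !(PySem.Set.contains (PySem.Set.ofList
        (((part.foldl (fun b node => PySem.Set.update b (PySem.Set.diff (g1.getD node PySem.Set.empty) (PySem.Set.ofList part))) PySem.Set.empty).filter
            (fun b => assigned.contains b)).map (fun b => assigned.getD b 0))) c)))
      = ((PySem.List.pyRange 0 num_regs).filter (fun c => !(PySem.Set.contains (pvReservedB g2 part assigned) c))) := by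
    apply List.filter_congr
    intro c _
    rw [pv_reserved_cross g1 g2 h part assigned c]
  rw [havail, pv_color_cross g1 g2 h part _ assigned]

-- ===== VERDICT (by name: the statement is the Claim_ definition above) =====
theorem allocate_registers_spec : Claim_equal_allocate_registers := by
  intro instructions live_ranges num_regs _hdom hpre
  unfold Spec_allocate_registers allocate_registers allocate_registers_alt
  exact pv_alloc_cross _ _ (pv_geq live_ranges hpre.1) _ _
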